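-- pv_equiv track=rewrite | github.com/marcus-aurelianus/codeforce | EDU105/1153.py | canConvert
-- ===== SOURCE A (Python) =====
-- def canConvert(str1, str2):
--      if str1 == str2:
--          return True
--      lookup = {}
--      for i, j in zip(str1, str2):
--          if lookup.setdefault(i, j) != j:
--              return False
--      return len(set(str2)) < 26
-- ===== SOURCE B (Python) =====
-- def canConvert(str1, str2):
--     if str1 == str2:
--         return True
--     ps = sorted(zip(str1, str2), key=lambda p: p[0])
--     if any(p[0] == q[0] and p[1] != q[1] for p, q in zip(ps, ps[1:])):
--         return False
--     t = sorted(str2)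
--     return len(t) - sum(x == y for x, y in zip(t, t[1:])) < 26
-- ===== Notes on version B (the rewrite author's own statement) =====
-- stated objective: alternative
-- what changed: Replaces A's incremental dict(setdefault) scan and its set(str2) with a sort-then-adjacent-scan: the zipped pairs are sorted by source char so an inconsistent mapping shows up as an adjacent mismatch, and the distinct letters of str2 are counted as len(sorted(str2)) minus the number of adjacent duplicates - no dict or set at all.
import Mathlib
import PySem

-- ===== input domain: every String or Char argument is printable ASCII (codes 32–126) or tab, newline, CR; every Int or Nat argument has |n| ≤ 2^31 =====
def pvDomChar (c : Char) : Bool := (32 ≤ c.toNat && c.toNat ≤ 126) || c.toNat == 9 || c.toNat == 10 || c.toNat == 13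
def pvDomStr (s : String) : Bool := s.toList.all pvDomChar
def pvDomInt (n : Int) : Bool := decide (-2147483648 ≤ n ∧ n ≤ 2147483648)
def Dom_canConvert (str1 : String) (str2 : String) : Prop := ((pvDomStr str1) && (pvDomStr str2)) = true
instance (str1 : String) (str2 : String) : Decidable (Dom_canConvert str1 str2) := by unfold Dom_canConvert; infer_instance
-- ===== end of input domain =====

-- B replaces A's incremental dict(setdefault)/set scan by sort-then-adjacent-scan (no dict or set); same value (alternative algorithm).

-- ===== PORT A =====
-- the 'for i, j in zip(str1, str2)' loop over the dict 'lookup', ending in 'len(set(str2)) < 26'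
def canConvertLoop (str2 : String) : List (Char × Char) → PySem.Dict Char Char → Bool
  | [], _ => decide (PySem.Set.len (PySem.Set.ofList str2.toList) < 26)
  | (i, j) :: rest, lookup =>
    let lookup' := lookup.setdefault i j
    if lookup'.getD i j ≠ j then false
    else canConvertLoop str2 rest lookup'

def canConvert (str1 : String) (str2 : String) : Bool :=
  if str1 == str2 then true
  else canConvertLoop str2 (List.zip str1.toList str2.toList) PySem.Dict.empty

-- ===== PORT B =====
def canConvert_alt (str1 : String) (str2 : String) : Bool :=
  if str1 == str2 then true
  else
    -- ps = sorted(zip(str1, str2), key=lambda p: p[0])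
    let ps := PySem.List.sorted (List.zip str1.toList str2.toList) (fun p => p.1) false
    -- any(p[0] == q[0] and p[1] != q[1] for p, q in zip(ps, ps[1:]))
    if (List.zip ps (PySem.List.slice ps (some 1) none)).any
        (fun pq => pq.1.1 == pq.2.1 && pq.1.2 != pq.2.2) then false
    else
      -- t = sorted(str2); len(t) - sum(x == y for x, y in zip(t, t[1:])) < 26
      let t := PySem.List.sorted str2.toList (fun c => c) false
      decide ((t.length : Int) -
        (((List.zip t (PySem.List.slice t (some 1) none)).countP (fun xy => xy.1 == xy.2) : Nat) : Int) < 26)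

-- ===== PRECONDITION & SPEC =====
def Spec_canConvert (str1 : String) (str2 : String) (out : Bool) : Prop := out = canConvert_alt str1 str2
instance (str1 : String) (str2 : String) (out : Bool) : Decidable (Spec_canConvert str1 str2 out) := by unfold Spec_canConvert; infer_instance

-- ===== CLAIM (what is proved, stated in full; the proofs are below) =====
def Claim_equal_canConvert : Prop := ∀ (str1 : String) (str2 : String), Dom_canConvert str1 str2 → Spec_canConvert str1 str2 (canConvert str1 str2)

-- ===== LEMMAS AND PROOFS =====

-- two zipped pairs with the same source char and different target chars
def hasConflict (l : List (Char × Char)) : Prop :=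
  ∃ p ∈ l, ∃ q ∈ l, p.1 = q.1 ∧ p.2 ≠ q.2

-- the check A performs on pair p: the first binding for p.1 (dict d, then first occurrence in l) equals p.2
def keyOK (d : PySem.Dict Char Char) (l : List (Char × Char)) (p : Char × Char) : Bool :=
  ((d.get? p.1).getD ((List.lookup p.1 l).getD p.2)) == p.2

theorem lookup_mem {α β : Type} [BEq α] [LawfulBEq α] {l : List (α × β)} {a : α} {b : β}
    (h : List.lookup a l = some b) : (a, b) ∈ l := by
  induction l with
  | nil => simp [List.lookup] at h
  | cons p rest ih =>
    obtain ⟨x, y⟩ := p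
    rw [List.lookup_cons] at h
    by_cases he : a == x
    · simp [he] at h; simp at he; simp [he, h]
    · simp [he] at h; exact List.mem_cons_of_mem _ (ih h)

theorem lookup_isSome {α β : Type} [BEq α] [LawfulBEq α] {l : List (α × β)} {p : α × β}
    (h : p ∈ l) : (List.lookup p.1 l).isSome := by
  induction l with
  | nil => simp at h
  | cons q rest ih =>
    rw [List.lookup_cons]
    by_cases he : p.1 == q.1
    · simp [he]
    · rcases List.mem_cons.1 h with h1 | h1
      · subst h1; simp at he
      · rw [Bool.not_eq_true] at he; simp [he]; simpa using ih h1

theorem keyOK_shift (d : PySem.Dict Char Char) (i j : Char) (rest : List (Char × Char))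
    (p : Char × Char) : keyOK (d.setdefault i j) rest p = keyOK d ((i, j) :: rest) p := by
  unfold keyOK
  by_cases hp : p.1 = i
  · rw [hp, PySem.Dict.get?_setdefault_self]
    simp
  · rw [PySem.Dict.get?_setdefault_of_ne _ _ hp]
    have hb : (p.1 == i) = false := by simp [hp]
    simp [List.lookup_cons, hb]

theorem loop_eq (str2 : String) (l : List (Char × Char)) : ∀ d : PySem.Dict Char Char,
    canConvertLoop str2 l d =
      if (∀ p ∈ l, keyOK d l p = true) then decide (PySem.Set.len (PySem.Set.ofList str2.toList) < 26)
      else false := by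
  induction l with
  | nil => intro d; simp [canConvertLoop]
  | cons hd rest ih =>
    intro d
    obtain ⟨i, j⟩ := hd
    have hhead : keyOK d ((i, j) :: rest) (i, j) = (d.getD i j == j) := by
      simp [keyOK, PySem.Dict.getD]
    by_cases hij : d.getD i j = j
    · have hcond : ¬ (d.setdefault i j).getD i j ≠ j := by
        rw [PySem.Dict.getD_setdefault_self]; simp [hij]
      simp only [canConvertLoop, if_neg hcond]
      rw [ih]
      have hiff : (∀ p ∈ rest, keyOK (d.setdefault i j) rest p = true)
          ↔ (∀ p ∈ (i, j) :: rest, keyOK d ((i, j) :: rest) p = true) := by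
        constructor
        · intro h p hp
          rcases List.mem_cons.1 hp with h1 | h1
          · subst h1; rw [hhead]; simp [hij]
          · rw [← keyOK_shift]; exact h p h1
        · intro h p hp
          rw [keyOK_shift]; exact h p (List.mem_cons_of_mem _ hp)
      by_cases hall : ∀ p ∈ (i, j) :: rest, keyOK d ((i, j) :: rest) p = true
      · rw [if_pos (hiff.2 hall), if_pos hall]
      · rw [if_neg (fun h => hall (hiff.1 h)), if_neg hall]
    · have hcond : (d.setdefault i j).getD i j ≠ j := by
        rw [PySem.Dict.getD_setdefault_self]; simpa [PySem.Dict.getD] using hij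
      simp only [canConvertLoop, if_pos hcond]
      rw [if_neg]
      intro hall
      have := hall (i, j) (List.mem_cons_self)
      rw [hhead] at this
      exact hij (by simpa using this)

theorem allKeyOK_empty (l : List (Char × Char)) :
    (∀ p ∈ l, keyOK PySem.Dict.empty l p = true) ↔ ¬ hasConflict l := by
  have hempty : ∀ k : Char, (PySem.Dict.empty : PySem.Dict Char Char).get? k = none := fun _ => rfl
  constructor
  · rintro hall ⟨p, hp, q, hq, h1, h2⟩
    obtain ⟨v, hv⟩ := Option.isSome_iff_exists.1 (lookup_isSome hp)
    have hpv : v = p.2 := by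
      have := hall p hp; rw [keyOK, hempty, hv] at this; simpa using this
    have hqv : v = q.2 := by
      have := hall q hq; rw [keyOK, hempty, ← h1, hv] at this; simpa using this
    exact h2 (hpv ▸ hqv)
  · intro hnc p hp
    rw [keyOK, hempty]
    cases hl : List.lookup p.1 l with
    | none => simp
    | some v =>
      have hm : (p.1, v) ∈ l := lookup_mem hl
      have : p.2 = v := by
        by_contra hne
        exact hnc ⟨p, hp, (p.1, v), hm, rfl, hne⟩
      simp [this]

theorem hasConflict_perm {l₁ l₂ : List (Char × Char)} (h : l₁.Perm l₂) :
    hasConflict l₁ ↔ hasConflict l₂ := by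
  unfold hasConflict
  constructor <;> rintro ⟨p, hp, q, hq, h1, h2⟩
  · exact ⟨p, h.mem_iff.1 hp, q, h.mem_iff.1 hq, h1, h2⟩
  · exact ⟨p, h.mem_iff.2 hp, q, h.mem_iff.2 hq, h1, h2⟩

-- the adjacent test B runs on the fst-sorted pair list
def adjP (pq : (Char × Char) × (Char × Char)) : Bool :=
  pq.1.1 == pq.2.1 && pq.1.2 != pq.2.2

-- along a fst-sorted list with no adjacent conflict, the whole run of the head's source char keeps its target
theorem head_run (t : List (Char × Char)) : ∀ x : Char × Char,
    (x :: t).Pairwise (fun a b => a.1 ≤ b.1) →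
    (List.zip (x :: t) t).any adjP = false →
    ∀ y ∈ t, y.1 = x.1 → y.2 = x.2 := by
  induction t with
  | nil => intro x _ _ y hy; simp at hy
  | cons z t' ih =>
    intro x hPW hno y hy hfst
    rw [List.zip_cons_cons, List.any_cons, Bool.or_eq_false_iff] at hno
    obtain ⟨hxz, hrest⟩ := hno
    have hxz' : x.1 = z.1 → x.2 = z.2 := by
      intro h
      by_contra hne
      simp [adjP, h, hne] at hxz
    rcases List.mem_cons.1 hy with h1 | h1
    · subst h1; exact (hxz' hfst.symm).symm
    · have hx_le_z : x.1 ≤ z.1 := (List.pairwise_cons.1 hPW).1 z List.mem_cons_self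
      have hz_le_y : z.1 ≤ y.1 :=
        (List.pairwise_cons.1 ((List.pairwise_cons.1 hPW).2)).1 y h1
      have hzx : z.1 = x.1 := le_antisymm (hfst ▸ hz_le_y) hx_le_z
      have hz2 : z.2 = x.2 := (hxz' hzx.symm).symm
      have := ih z ((List.pairwise_cons.1 hPW).2)
        (by
          cases t' with
          | nil => simp
          | cons w t'' => simpa using hrest) y h1 (hfst.trans hzx.symm)
      rw [this, hz2]

theorem noAdj_noConflict (s : List (Char × Char))
    (hPW : s.Pairwise (fun a b => a.1 ≤ b.1))
    (hno : (List.zip s s.tail).any adjP = false) : ¬ hasConflict s := by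
  induction s with
  | nil => rintro ⟨p, hp, _⟩; simp at hp
  | cons x t ih =>
    rintro ⟨p, hp, q, hq, h1, h2⟩
    have hrun := head_run t x hPW (by simpa using hno)
    have hnt : (List.zip t t.tail).any adjP = false := by
      cases t with
      | nil => simp
      | cons z t' =>
        rw [List.tail_cons, List.zip_cons_cons, List.any_cons, Bool.or_eq_false_iff] at hno
        exact hno.2
    rcases List.mem_cons.1 hp with hp1 | hp1 <;> rcases List.mem_cons.1 hq with hq1 | hq1
    · exact h2 (hp1 ▸ hq1 ▸ rfl)
    · subst hp1; exact h2 (hrun q hq1 h1.symm).symm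
    · subst hq1; exact h2 (hrun p hp1 h1)
    · exact ih ((List.pairwise_cons.1 hPW).2) hnt ⟨p, hp1, q, hq1, h1, h2⟩

theorem anyAdj_conflict (s : List (Char × Char))
    (hany : (List.zip s s.tail).any adjP = true) : hasConflict s := by
  induction s with
  | nil => simp at hany
  | cons x t ih =>
    cases t with
    | nil => simp at hany
    | cons z t' =>
      rw [List.tail_cons, List.zip_cons_cons, List.any_cons, Bool.or_eq_true] at hany
      rcases hany with h | h
      · have h1 : x.1 = z.1 := by
          by_contra hne; simp [adjP, hne] at h
        have h2 : x.2 ≠ z.2 := by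
          intro he; simp [adjP, he] at h
        exact ⟨x, List.mem_cons_self, z, List.mem_cons_of_mem _ List.mem_cons_self, h1, h2⟩
      · obtain ⟨p, hp, q, hq, h1, h2⟩ := ih (by simpa using h)
        exact ⟨p, List.mem_cons_of_mem _ hp, q, List.mem_cons_of_mem _ hq, h1, h2⟩

theorem anyAdj_iff (s : List (Char × Char))
    (hPW : s.Pairwise (fun a b => a.1 ≤ b.1)) :
    (List.zip s s.tail).any adjP = true ↔ hasConflict s := by
  constructor
  · exact anyAdj_conflict s
  · intro hc
    by_contra hany
    exact noAdj_noConflict s hPW (Bool.not_eq_true _ ▸ hany) hc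

-- on a sorted char list, distinct count + adjacent-duplicate count = length
theorem card_add_adj (t : List Char) (hPW : t.Pairwise (· ≤ ·)) :
    t.toFinset.card + (List.zip t t.tail).countP (fun xy => xy.1 == xy.2) = t.length := by
  induction t with
  | nil => simp
  | cons x t' ih =>
    cases t' with
    | nil => simp
    | cons y t'' =>
      rw [List.tail_cons, List.zip_cons_cons, List.countP_cons]
      have hPW' : (y :: t'').Pairwise (· ≤ ·) := (List.pairwise_cons.1 hPW).2
      have ihr := ih hPW'
      have hx_le : ∀ w ∈ y :: t'', x ≤ w := (List.pairwise_cons.1 hPW).1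
      have hmem_iff : x ∈ y :: t'' ↔ x = y := by
        constructor
        · intro hm
          rcases List.mem_cons.1 hm with h1 | h1
          · exact h1
          · exact le_antisymm (hx_le y List.mem_cons_self)
              ((List.pairwise_cons.1 hPW').1 x h1)
        · intro h; exact h ▸ List.mem_cons_self
      by_cases hxy : x = y
      · have hmem : x ∈ y :: t'' := hmem_iff.2 hxy
        rw [List.toFinset_cons, Finset.insert_eq_self.2 (List.mem_toFinset.2 hmem)]
        simp only [hxy, BEq.rfl, if_pos]
        simp only [List.tail_cons] at ihr
        simp only [List.length_cons] at ihr ⊢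
        omega
      · have hmem : x ∉ y :: t'' := fun h => hxy (hmem_iff.1 h)
        rw [List.toFinset_cons, Finset.card_insert_of_notMem (by simpa using hmem)]
        have : ((x == y) : Bool) = false := by simp [hxy]
        simp only [this, Bool.false_eq_true, if_false]
        simp only [List.tail_cons] at ihr
        simp only [List.length_cons] at ihr ⊢
        omega

theorem setLen_eq_card (l : List Char) : (PySem.Set.ofList l).length = l.toFinset.card := by
  have hnd : (PySem.Set.ofList l).Nodup := PySem.Set.nodup_ofList l
  have hfs : (PySem.Set.ofList l).toFinset = l.toFinset := by
    ext c
    simp [List.mem_toFinset, PySem.Set.mem_ofList]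
  rw [← List.toFinset_card_of_nodup hnd, hfs]

-- ===== VERDICT (by name: the statement is the Claim_ definition above) =====
theorem canConvert_spec : Claim_equal_canConvert := by
  intro str1 str2 _
  show canConvert str1 str2 = canConvert_alt str1 str2
  by_cases he : str1 == str2
  · simp [canConvert, canConvert_alt, he]
  · rw [canConvert, canConvert_alt, if_neg he, if_neg he]
    rw [loop_eq]
    set zl := List.zip str1.toList str2.toList with hzl
    set ps := PySem.List.sorted zl (fun p => p.1) false with hps
    have hperm : ps.Perm zl := PySem.List.sorted_perm ..
    have hPW : ps.Pairwise (fun a b => a.1 ≤ b.1) := PySem.List.sorted_pairwise ..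
    simp only [PySem.List.slice_from_one]
    have hadj : ((List.zip ps ps.tail).any fun pq => pq.1.1 == pq.2.1 && pq.1.2 != pq.2.2) = true
        ↔ hasConflict zl :=
      (anyAdj_iff ps hPW).trans (hasConflict_perm hperm)
    set t := PySem.List.sorted str2.toList (fun c => c) false with ht
    have htperm : t.Perm str2.toList := PySem.List.sorted_perm ..
    have htPW : t.Pairwise (· ≤ ·) := by
      have := PySem.List.sorted_pairwise (xs := str2.toList) (key := fun c => c)
      simpa using this
    have hval : decide (PySem.Set.len (PySem.Set.ofList str2.toList) < 26) =
        decide ((t.length : Int) -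
          (((List.zip t t.tail).countP (fun xy => xy.1 == xy.2) : Nat) : Int) < 26) := by
      rw [decide_eq_decide]
      have hcard := card_add_adj t htPW
      have hlen : PySem.Set.len (PySem.Set.ofList str2.toList) =
          ((PySem.Set.ofList str2.toList).length : Int) := rfl
      rw [hlen, setLen_eq_card, ← List.toFinset_eq_of_perm _ _ htperm]
      omega
    by_cases hc : hasConflict zl
    · rw [if_neg (fun h => (allKeyOK_empty zl).1 h hc), if_pos (hadj.2 hc)]
    · rw [if_pos ((allKeyOK_empty zl).2 hc)]
      rw [if_neg (fun h => hc (hadj.1 h))]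
      exact hval
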